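-- pv_equiv track=rewrite | github.com/pypi-data/pypi-mirror-383 | packages/simera/simera-0.3.2-py3-none-any.whl/simera/zipcode.py | _parse_regex_to_allowed_sets
-- ===== SOURCE A (Python) =====
-- def _parse_regex_to_allowed_sets(pattern: str) -> list[set[str]]:
--     """
--     Strips ^/$ anchors and turns a fixed‐length regex_clean pattern
--     into, for each position, the set of allowed characters.
--     """
--     allowed_sets = []
--     i = 0
--     while i < len(pattern):
--         if pattern[i] == '\\':            # \d, \s, or literal
--             esc = pattern[i+1]
--             if esc == 'd':
--                 token_set = set('0123456789')
--             elif esc == 's':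
--                 token_set = {' '}
--             else:
--                 token_set = {esc}
--             i += 2
--
--         elif pattern[i] == '[':          # character class
--             j = pattern.find(']', i)
--             char_class = pattern[i+1:j]
--             token_set = set()
--             k = 0
--             while k < len(char_class):
--                 if k+2 < len(char_class) and char_class[k+1] == '-':
--                     start, end = char_class[k], char_class[k+2]
--                     token_set.update(chr(c) for c in range(ord(start), ord(end)+1))
--                     k += 3
--                 else:
--                     token_set.add(char_class[k]); k += 1
--             i = j+1
--
--         elif pattern[i] in '().?':       # skip grouping/optional markers
--             i += 1
--             continue
--
--         else:                            # literal
--             token_set = {pattern[i]}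
--             i += 1
--
--         # see if there's a '{n}' quantifier or '?' right after
--         if i < len(pattern) and pattern[i] == '{':
--             j = pattern.find('}', i)
--             quant = pattern[i+1:j]
--             count = int(quant.split(',',1)[-1])
--             allowed_sets.extend([token_set] * count)
--             i = j+1
--         elif i < len(pattern) and pattern[i] == '?':
--             allowed_sets.append(token_set)
--             i += 1
--         else:
--             allowed_sets.append(token_set)
--
--     return allowed_sets
-- ===== SOURCE B (Python) =====
-- _DIGITS = '0123456789'
--
--
-- def _parse_regex_to_allowed_sets(pattern: str) -> list:
--     """Character-driven state machine: one pass over the characters with an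
--     explicit mode (normal / escape / class / quantifier / after-token),
--     no index arithmetic, no find() lookahead, no slicing."""
--     out = []
--     state, tok, buf = 'N', None, []
--     for c in pattern:
--         if state == 'A':                 # a token is pending: look for its quantifier
--             if c == '{':
--                 state, buf = 'Q', []
--                 continue
--             if c == '?':
--                 out.append(tok)
--                 state = 'N'
--                 continue
--             out.append(tok)
--             state = 'N'                  # fall through: reprocess c in normal mode
--         if state == 'N':
--             if c == '\\':
--                 state = 'E'
--             elif c == '[':
--                 state, buf = 'C', []
--             elif c not in '().?':
--                 tok, state = {c}, 'A'
--         elif state == 'E':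
--             tok = set(_DIGITS) if c == 'd' else {' '} if c == 's' else {c}
--             state = 'A'
--         elif state == 'C':
--             if c == ']':
--                 tok, state = _expand_class(buf), 'A'
--             else:
--                 buf.append(c)
--         elif state == 'Q':
--             if c == '}':
--                 out.extend([tok] * int(''.join(buf).split(',', 1)[-1]))
--                 state = 'N'
--             else:
--                 buf.append(c)
--     if state == 'A':
--         out.append(tok)
--     return out
--
--
-- def _expand_class(buf):
--     s, k = set(), 0
--     while k < len(buf):
--         if k + 2 < len(buf) and buf[k + 1] == '-':
--             s.update(chr(x) for x in range(ord(buf[k]), ord(buf[k + 2]) + 1))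
--             k += 3
--         else:
--             s.add(buf[k])
--             k += 1
--     return s
-- ===== Notes on version B (the rewrite author's own statement) =====
-- stated objective: alternative
-- what changed: A's index-jumping scanner (while over i with find()/slice lookahead for ']', '{' and the quantifier) is replaced by a character-driven finite state machine: one for-loop over the characters with an explicit mode (normal/escape/class/quantifier/after-token) and small buffers, no index arithmetic, no find(), no slicing.
import Mathlib
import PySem

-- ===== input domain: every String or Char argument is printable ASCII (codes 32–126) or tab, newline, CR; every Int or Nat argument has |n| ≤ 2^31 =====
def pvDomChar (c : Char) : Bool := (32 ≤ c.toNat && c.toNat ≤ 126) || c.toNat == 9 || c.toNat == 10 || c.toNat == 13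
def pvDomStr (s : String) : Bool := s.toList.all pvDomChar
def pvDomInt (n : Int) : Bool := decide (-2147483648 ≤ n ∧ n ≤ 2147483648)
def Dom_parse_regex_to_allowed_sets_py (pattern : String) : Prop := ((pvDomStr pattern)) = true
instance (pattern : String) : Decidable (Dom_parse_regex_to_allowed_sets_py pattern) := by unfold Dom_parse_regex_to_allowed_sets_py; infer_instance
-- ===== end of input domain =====

-- B replaces A's index-jumping scanner (find()/slice lookahead) by a character-driven finite state
-- machine: one fold over the characters with an explicit mode; same return value wherever the
-- Python A returns normally (objective: alternative).


-- ===== PORT A =====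
-- set('0123456789') and the chr-range of a char class
def pvDigits : List String := ["0", "1", "2", "3", "4", "5", "6", "7", "8", "9"]
def pvRangeSet (a b : Char) : List String :=
  (PySem.List.pyRange (a.toNat : Int) ((b.toNat : Int) + 1) 1).map (fun n => String.ofList [Char.ofNat n.toNat])

-- A's inner while-loop over the character class (k-indexed scan, ported over the suffix)
def pvClassA : List Char → PySem.Set String → PySem.Set String
  | a :: '-' :: b :: rest, acc => pvClassA rest (PySem.Set.update acc (pvRangeSet a b))
  | a :: rest, acc => pvClassA rest (PySem.Set.add acc (String.ofList [a]))
  | [], acc => acc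

-- the main while-loop of A: state = remaining suffix pattern[i:] and the growing allowed_sets;
-- pvQuantA is the quantifier lookahead at the end of the loop body.  Fuel = one unit per step
-- (the while body splits into loop/quant steps); each iteration consumes >= 1 char, so
-- 2*length+2 is always enough.  Where the Python raises or loops forever (outside Pre_)
-- the port returns the current acc.
mutual
def pvLoopA : Nat → List Char → List (List String) → List (List String)
  | 0, _, acc => acc
  | fuel + 1, cs, acc =>
    match cs with
    | [] => acc
    | c :: r =>
      if c = '\\' then
        match r with
        | [] => acc            -- Python: IndexError
        | e :: r' =>
          pvQuantA fuel (if e = 'd' then pvDigits else if e = 's' then [" "] else [String.ofList [e]]) r' acc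
      else if c = '[' then
        let j := PySem.Chars.find r [']']
        if j = -1 then acc     -- Python: i = 0, diverges
        else pvQuantA fuel (pvClassA (r.take j.toNat) []) (r.drop (j.toNat + 1)) acc
      else if c = '(' ∨ c = ')' ∨ c = '.' ∨ c = '?' then pvLoopA fuel r acc
      else pvQuantA fuel [String.ofList [c]] r acc

def pvQuantA : Nat → List String → List Char → List (List String) → List (List String)
  | 0, _, _, acc => acc
  | fuel + 1, tok, r2, acc =>
    match r2 with
    | c2 :: r3 =>
      if c2 = '{' then
        let j := PySem.Chars.find r3 ['}']
        if j = -1 then acc     -- Python: int of a dropLast slice then i = 0: raises or diverges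
        else
          match PySem.Int.ofChars? (((PySem.Chars.splitMax? (r3.take j.toNat) [','] 1).getD []).getLastD []) with
          | none => acc        -- Python: ValueError
          | some n => pvLoopA fuel (r3.drop (j.toNat + 1)) (acc ++ List.replicate n.toNat tok)
      else if c2 = '?' then pvLoopA fuel r3 (acc ++ [tok])
      else pvLoopA fuel (c2 :: r3) (acc ++ [tok])
    | [] => pvLoopA fuel [] (acc ++ [tok])
end

def parse_regex_to_allowed_sets_py (pattern : String) : List (List String) :=
  pvLoopA (2 * pattern.toList.length + 2) pattern.toList []

-- ===== PORT B =====
-- int(''.join(buf).split(',',1)[-1])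
def pvCountB? (q : List Char) : Option Int :=
  PySem.Int.ofChars? (((PySem.Chars.splitMax? q [','] 1).getD []).getLastD [])

-- B's _expand_class helper (while-loop over the buffered class characters)
def pvExpandClassB : List Char → PySem.Set String → PySem.Set String
  | a :: '-' :: b :: rest, acc => pvExpandClassB rest (PySem.Set.update acc (pvRangeSet a b))
  | a :: rest, acc => pvExpandClassB rest (PySem.Set.add acc (String.ofList [a]))
  | [], acc => acc

-- the machine's modes: normal / escape / class (buffer) / quantifier (token, buffer) /
-- after-token (pending token) / failed (Python B raised ValueError; outside Pre_)
inductive PvB where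
  | N | E | F
  | A : List String → PvB
  | C : List Char → PvB
  | Q : List String → List Char → PvB
deriving DecidableEq, Repr

def pvNormB (c : Char) : PvB :=
  if c = '\\' then .E
  else if c = '[' then .C []
  else if c = '(' ∨ c = ')' ∨ c = '.' ∨ c = '?' then .N
  else .A [String.ofList [c]]

def pvEscB (c : Char) : List String :=
  if c = 'd' then pvDigits else if c = 's' then [" "] else [String.ofList [c]]

-- one character of B's for-loop
def pvStepB : PvB × List (List String) → Char → PvB × List (List String)
  | (.A tok, out), c =>
    if c = '{' then (.Q tok [], out)
    else if c = '?' then (.N, out ++ [tok])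
    else (pvNormB c, out ++ [tok])          -- emit, then reprocess c in normal mode
  | (.N, out), c => (pvNormB c, out)
  | (.E, out), c => (.A (pvEscB c), out)
  | (.C buf, out), c =>
    if c = ']' then (.A (pvExpandClassB buf []), out) else (.C (buf ++ [c]), out)
  | (.Q tok buf, out), c =>
    if c = '}' then
      match pvCountB? buf with
      | some n => (.N, out ++ List.replicate n.toNat tok)
      | none => (.F, out)                   -- Python B: int() raises ValueError (outside Pre_)
    else (.Q tok (buf ++ [c]), out)
  | (.F, out), _ => (.F, out)

def pvFinishB : PvB × List (List String) → List (List String)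
  | (.A tok, out) => out ++ [tok]
  | (_, out) => out

def parse_regex_to_allowed_sets_py_alt (pattern : String) : List (List String) :=
  pvFinishB (pattern.toList.foldl pvStepB (.N, []))

-- ===== PRECONDITION & SPEC =====
-- Pre_ excludes exactly the inputs on which the Python A does not return normally: a trailing
-- backslash (IndexError), an unclosed '[' class or unclosed '{' quantifier (int() ValueError, or
-- i is reset to 0 and the loop never terminates), and a quantifier body whose last ','-field is
-- not a valid int literal (ValueError).  It is a left-to-right state recognizer of the grammar.
inductive PvSt where
  | norm | esc | afterTok | inClass | fail
  | quant (acc : List Char)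

def pvStep (st : PvSt) (c : Char) : PvSt :=
  let normStep : PvSt :=
    if c = '\\' then .esc
    else if c = '[' then .inClass
    else if c = '(' ∨ c = ')' ∨ c = '.' ∨ c = '?' then .norm
    else .afterTok
  match st with
  | .norm => normStep
  | .esc => .afterTok
  | .afterTok =>
    if c = '{' then .quant []
    else if c = '?' then .norm
    else normStep
  | .inClass => if c = ']' then .afterTok else .inClass
  | .quant acc =>
    if c = '}' then (if (pvCountB? acc).isSome then .norm else .fail)
    else .quant (acc ++ [c])
  | .fail => .fail

def pvOkS (cs : List Char) : Bool :=
  match cs.foldl pvStep .norm with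
  | .norm => true
  | .afterTok => true
  | _ => false

def Pre_parse_regex_to_allowed_sets_py (pattern : String) : Prop :=
  pvOkS pattern.toList = true
instance (pattern : String) : Decidable (Pre_parse_regex_to_allowed_sets_py pattern) := by
  unfold Pre_parse_regex_to_allowed_sets_py; infer_instance

def pvWitness_parse_regex_to_allowed_sets_py : String := "\\d{2}[A-C]x?"

def Spec_parse_regex_to_allowed_sets_py (pattern : String) (out : List (List String)) : Prop :=
  out = parse_regex_to_allowed_sets_py_alt pattern
instance (pattern : String) (out : List (List String)) : Decidable (Spec_parse_regex_to_allowed_sets_py pattern out) := by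
  unfold Spec_parse_regex_to_allowed_sets_py; infer_instance

-- ===== CLAIM (what is proved, stated in full; the proofs are below) =====
-- The ports in fact agree on every input; Pre_ is needed because outside it the Python A raises
-- or diverges, so there is no Python value to claim there.
def Claim_equal_parse_regex_to_allowed_sets_py : Prop :=
  ∀ (pattern : String), Dom_parse_regex_to_allowed_sets_py pattern →
    Pre_parse_regex_to_allowed_sets_py pattern →
      Spec_parse_regex_to_allowed_sets_py pattern (parse_regex_to_allowed_sets_py pattern)

-- ===== LEMMAS AND PROOFS =====
theorem pvClass_eq (cc : List Char) (s : PySem.Set String) :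
    pvClassA cc s = pvExpandClassB cc s := by
  induction cc, s using pvClassA.induct with
  | case1 a b rest acc ih => simpa [pvClassA, pvExpandClassB] using ih
  | case2 a rest acc h ih =>
    rw [pvClassA.eq_2 _ _ _ h, pvExpandClassB.eq_2 _ _ _ h]; exact ih
  | case3 acc => rfl

theorem pvRunF (cs : List Char) (out : List (List String)) :
    cs.foldl pvStepB (.F, out) = (.F, out) := by
  induction cs with
  | nil => rfl
  | cons c r ih => simpa [pvStepB] using ih

theorem pvRunC (pre : List Char) (h : ']' ∉ pre) :
    ∀ (buf rest : List Char) (out : List (List String)),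
      (pre ++ rest).foldl pvStepB (.C buf, out) = rest.foldl pvStepB (.C (buf ++ pre), out) := by
  induction pre with
  | nil => intro buf rest out; simp
  | cons a pre ih =>
    intro buf rest out
    have ha : a ≠ ']' := fun e => h (e ▸ List.mem_cons_self)
    have h' : ']' ∉ pre := fun m => h (List.mem_cons_of_mem _ m)
    simpa [pvStepB, ha] using ih h' (buf ++ [a]) rest out

theorem pvRunQ (pre : List Char) (h : '}' ∉ pre) :
    ∀ (tok : List String) (buf rest : List Char) (out : List (List String)),
      (pre ++ rest).foldl pvStepB (.Q tok buf, out) = rest.foldl pvStepB (.Q tok (buf ++ pre), out) := by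
  induction pre with
  | nil => intro tok buf rest out; simp
  | cons a pre ih =>
    intro tok buf rest out
    have ha : a ≠ '}' := fun e => h (e ▸ List.mem_cons_self)
    have h' : '}' ∉ pre := fun m => h (List.mem_cons_of_mem _ m)
    simpa [pvStepB, ha] using ih h' tok (buf ++ [a]) rest out

theorem pvMemSingletonInfix {x : Char} {l : List Char} : x ∈ l ↔ [x] <:+: l := by
  constructor
  · intro hm
    obtain ⟨s, t, rfl⟩ := List.append_of_mem hm
    exact ⟨s, t, by simp⟩
  · rintro ⟨s, t, rfl⟩; simp

-- characterization of find for a single-character needle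
theorem pvFindSplit (r : List Char) (x : Char) (h : PySem.Chars.find r [x] ≠ -1) :
    x ∉ r.take (PySem.Chars.find r [x]).toNat ∧
      r = r.take (PySem.Chars.find r [x]).toNat ++ x :: r.drop ((PySem.Chars.find r [x]).toNat + 1) := by
  have hnn : 0 ≤ PySem.Chars.find r [x] := (PySem.Chars.find_nonneg_iff r [x]).2
    ((PySem.Chars.find_ne_neg_one_iff r [x]).1 h)
  obtain ⟨hpre, hmin⟩ := PySem.Chars.find_spec hnn
  set j := (PySem.Chars.find r [x]).toNat with hj
  obtain ⟨t, ht⟩ := hpre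
  have hjlen : j < r.length := by
    by_contra hge
    rw [List.drop_eq_nil_of_le (by omega)] at ht
    simp at ht
  have htd : t = r.drop (j + 1) := by
    have h2 := congrArg (List.drop 1) ht
    simpa [List.drop_drop, Nat.add_comm] using h2
  have hget : r.drop j = x :: r.drop (j + 1) := by
    rw [← ht, htd]; rfl
  constructor
  · intro hmem
    obtain ⟨i, hi, hix⟩ := List.mem_iff_getElem.1 hmem
    have hil : i < j := by
      have h3 := hi; simp at h3; omega
    have hir : i < r.length := by omega
    apply hmin i hil
    refine ⟨r.drop (i + 1), ?_⟩
    have hgi : r[i]'hir = x := by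
      have h4 := hix
      simpa [List.getElem_take] using h4
    calc [x] ++ r.drop (i + 1) = r[i]'hir :: r.drop (i + 1) := by rw [hgi]; rfl
      _ = r.drop i := List.getElem_cons_drop hir
  · conv_lhs => rw [← List.take_append_drop j r]
    rw [hget]

theorem pvMain : ∀ (f : Nat),
    (∀ (cs : List Char) (acc : List (List String)),
      2 * cs.length < f → pvLoopA f cs acc = pvFinishB (cs.foldl pvStepB (.N, acc))) ∧
    (∀ (tok : List String) (r2 : List Char) (acc : List (List String)),
      2 * r2.length + 2 ≤ f → pvQuantA f tok r2 acc = pvFinishB (r2.foldl pvStepB (.A tok, acc))) := by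
  intro f
  induction f with
  | zero =>
    exact ⟨fun cs acc h => absurd h (by omega), fun tok r2 acc h => absurd h (by omega)⟩
  | succ f ih =>
    obtain ⟨ih1, ih2⟩ := ih
    constructor
    · intro cs acc h1
      cases cs with
      | nil => simp [pvLoopA, pvFinishB]
      | cons c r =>
        simp only [List.length_cons] at h1
        by_cases hb : c = '\\'
        · subst hb
          cases r with
          | nil => simp [pvLoopA, pvStepB, pvNormB, pvFinishB]
          | cons e r' =>
            simp only [List.length_cons] at h1
            have hq := ih2 (if e = 'd' then pvDigits else if e = 's' then [" "] else [String.ofList [e]])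
              r' acc (by omega)
            simp only [pvLoopA, hq]
            simp [pvStepB, pvNormB, pvEscB]
        · by_cases hbr : c = '['
          · subst hbr
            simp only [pvLoopA, if_neg hb]
            by_cases hj : PySem.Chars.find r [']'] = -1
            · have hnin : ']' ∉ r := fun hm =>
                (PySem.Chars.find_eq_neg_one_iff r [']']).1 hj (pvMemSingletonInfix.1 hm)
              rw [if_pos hj]
              have : r.foldl pvStepB (.C [], acc) = (.C ([] ++ r), acc) := by
                simpa using pvRunC r hnin [] [] acc
              simp [pvStepB, pvNormB, this, pvFinishB]
            · obtain ⟨hnin, hsplit⟩ := pvFindSplit r ']' hj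
              set j := (PySem.Chars.find r [']']).toNat with hjdef
              have hlen : (r.drop (j + 1)).length ≤ r.length := by simp
              have hjr : j < r.length := by
                have := congrArg List.length hsplit
                simp at this; omega
              have hq := ih2 (pvClassA (r.take j) []) (r.drop (j + 1)) acc
                (by simp only [List.length_drop]; omega)
              rw [if_neg hj, hq]
              have hfold : r.foldl pvStepB (.C [], acc)
                  = (']' :: r.drop (j + 1)).foldl pvStepB (.C ([] ++ r.take j), acc) := by
                conv_lhs => rw [hsplit]
                exact pvRunC (r.take j) hnin [] (']' :: r.drop (j + 1)) acc
              simp only [pvStepB, pvNormB, List.foldl_cons, if_neg hb, reduceIte, hfold,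
                List.nil_append, pvClass_eq]
          · by_cases hsk : c = '(' ∨ c = ')' ∨ c = '.' ∨ c = '?'
            · have hr := ih1 r acc (by omega)
              have hn : pvNormB c = .N := by simp [pvNormB, hb, hbr, hsk]
              simp only [pvLoopA, if_neg hb, if_neg hbr, if_pos hsk, hr, List.foldl_cons,
                pvStepB, hn]
            · have hq := ih2 [String.ofList [c]] r acc (by omega)
              have hn : pvNormB c = .A [String.ofList [c]] := by simp [pvNormB, hb, hbr, hsk]
              simp only [pvLoopA, if_neg hb, if_neg hbr, if_neg hsk, hq, List.foldl_cons,
                pvStepB, hn]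
    · intro tok r2 acc h1
      cases r2 with
      | nil =>
        cases f with
        | zero => simp [pvQuantA, pvLoopA, pvFinishB]
        | succ f' => simp [pvQuantA, pvLoopA, pvFinishB]
      | cons c2 r3 =>
        simp only [List.length_cons] at h1
        by_cases hq : c2 = '{'
        · subst hq
          simp only [pvQuantA, List.foldl_cons, pvStepB, reduceIte]
          by_cases hj : PySem.Chars.find r3 ['}'] = -1
          · have hnin : '}' ∉ r3 := fun hm =>
              (PySem.Chars.find_eq_neg_one_iff r3 ['}']).1 hj (pvMemSingletonInfix.1 hm)
            rw [if_pos hj]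
            have hrun : r3.foldl pvStepB (.Q tok [], acc) = (.Q tok ([] ++ r3), acc) := by
              simpa using pvRunQ r3 hnin tok [] [] acc
            simp [hrun, pvFinishB]
          · obtain ⟨hnin, hsplit⟩ := pvFindSplit r3 '}' hj
            set j := (PySem.Chars.find r3 ['}']).toNat with hjdef
            have hjr : j < r3.length := by
              have h5 := congrArg List.length hsplit
              simp at h5; omega
            have hfold : r3.foldl pvStepB (.Q tok [], acc)
                = ('}' :: r3.drop (j + 1)).foldl pvStepB (.Q tok ([] ++ r3.take j), acc) := by
              conv_lhs => rw [hsplit]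
              exact pvRunQ (r3.take j) hnin tok [] ('}' :: r3.drop (j + 1)) acc
            rw [if_neg hj, hfold]
            cases hof : PySem.Int.ofChars?
                (((PySem.Chars.splitMax? (r3.take j) [','] 1).getD []).getLastD []) with
            | none =>
              have hof' : PySem.Int.ofChars?
                  (((PySem.Chars.splitMax? (r3.take j) [','] 1).getD []).getLast?.getD []) = none := by
                simpa [List.getLastD_eq_getLast?] using hof
              simp [pvStepB, pvCountB?, hof', pvRunF, pvFinishB]
            | some n =>
              have hof' : PySem.Int.ofChars?
                  (((PySem.Chars.splitMax? (r3.take j) [','] 1).getD []).getLast?.getD []) = some n := by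
                simpa [List.getLastD_eq_getLast?] using hof
              have hr := ih1 (r3.drop (j + 1)) (acc ++ List.replicate n.toNat tok)
                (by simp only [List.length_drop]; omega)
              simp [pvStepB, pvCountB?, hof', hr]
        · by_cases hw : c2 = '?'
          · subst hw
            have hr := ih1 r3 (acc ++ [tok]) (by omega)
            simp [pvQuantA, pvStepB, hr]
          · have hr := ih1 (c2 :: r3) (acc ++ [tok]) (by simp only [List.length_cons]; omega)
            simp only [pvQuantA, if_neg hq, if_neg hw, hr, List.foldl_cons, pvStepB]

-- ===== VERDICT (by name: the statement is the Claim_ definition above) =====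
theorem parse_regex_to_allowed_sets_py_spec : Claim_equal_parse_regex_to_allowed_sets_py := by
  intro pattern _ _
  unfold Spec_parse_regex_to_allowed_sets_py parse_regex_to_allowed_sets_py parse_regex_to_allowed_sets_py_alt
  exact (pvMain (2 * pattern.toList.length + 2)).1 pattern.toList [] (by omega)
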